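-- pv_equiv track=rewrite | github.com/balevinstein/philosophy-pipeline | src/phases/phase_three/stages/stage_two/workers/integration/paper_integration.py | _extract_final_paper
-- ===== SOURCE A (Python) =====
-- def _extract_final_paper(content: str) -> str:
--     """Extract the final paper from the response"""
--     # With simplified output format, the entire response should be the paper
--     # But we still need to handle cases where the LLM might add extra text
--
--     lines = content.split('\n')
--     paper_lines = []
--     found_title = False
--
--     for line in lines:
--         # Skip any initial meta-commentary
--         if not found_title and line.startswith('# ') and not any(x in line.lower() for x in ['integration', 'summary', 'changes', 'statistics', 'note', 'important']):
--             found_title = True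
--             paper_lines.append(line)
--         elif found_title:
--             # Stop if we hit meta-sections (though there shouldn't be any)
--             if any(x in line for x in ['# Integration Summary', '# Changes Made', '# Final Statistics', 'Would you like', 'Shall I proceed']):
--                 break
--             paper_lines.append(line)
--         elif not found_title and line.strip() and not line.startswith('#'):
--             # If we haven't found a title yet but see content, it might be the start
--             paper_lines.append(line)
--
--     final_paper = '\n'.join(paper_lines).strip()
--
--     # If we still don't have much content, just return the whole response
--     if len(final_paper) < 1000:
--         # Remove obvious meta-commentary but keep everything else
--         cleaned_lines = []
--         for line in content.split('\n'):
--             if not any(phrase in line.lower() for phrase in ['would you like', 'shall i proceed', 'important note', 'due to length limitations']):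
--                 cleaned_lines.append(line)
--         final_paper = '\n'.join(cleaned_lines).strip()
--
--     return final_paper
-- ===== SOURCE B (Python) =====
-- def _extract_final_paper(content: str) -> str:
--     """Extract the final paper from the response"""
--     META = ['integration', 'summary', 'changes', 'statistics', 'note', 'important']
--     BREAKS = ['# Integration Summary', '# Changes Made', '# Final Statistics',
--               'Would you like', 'Shall I proceed']
--
--     lines = content.split('\n')
--
--     def is_title(line):
--         return line.startswith('# ') and not any(x in line.lower() for x in META)
--
--     idx = next((i for i, l in enumerate(lines) if is_title(l)), len(lines))
--
--     paper_lines = [l for l in lines[:idx] if l.strip() and not l.startswith('#')]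
--     if idx < len(lines):
--         paper_lines.append(lines[idx])
--         for line in lines[idx + 1:]:
--             if any(x in line for x in BREAKS):
--                 break
--             paper_lines.append(line)
--
--     final_paper = '\n'.join(paper_lines).strip()
--
--     if len(final_paper) < 1000:
--         final_paper = '\n'.join(
--             l for l in lines
--             if not any(p in l.lower() for p in ['would you like', 'shall i proceed',
--                                                'important note', 'due to length limitations'])
--         ).strip()
--
--     return final_paper
-- ===== Notes on version B (the rewrite author's own statement) =====
-- stated objective: simpler
-- what changed: A's single stateful scan with a found_title flag and three interleaved branches is replaced by a decomposition: locate the title index first, then separately build the filtered pre-title lines, the title line, and the body lines up to the first break phrase.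
import Mathlib
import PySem

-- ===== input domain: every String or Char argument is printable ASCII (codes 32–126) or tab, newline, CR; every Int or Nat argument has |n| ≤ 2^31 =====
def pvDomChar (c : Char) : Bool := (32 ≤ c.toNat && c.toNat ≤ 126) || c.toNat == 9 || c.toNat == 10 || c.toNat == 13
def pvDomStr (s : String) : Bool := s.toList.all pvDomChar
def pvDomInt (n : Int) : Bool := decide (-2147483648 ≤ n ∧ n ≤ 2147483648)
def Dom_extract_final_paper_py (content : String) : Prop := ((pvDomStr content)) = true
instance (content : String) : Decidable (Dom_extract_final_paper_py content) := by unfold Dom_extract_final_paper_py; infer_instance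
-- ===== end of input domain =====

-- B replaces A's single stateful scan (found_title flag with three interleaved branches)
-- by a decomposition: find the title index first, then build the pre-title filter, the
-- title line and the body-until-break-phrase as separate pieces (objective: simpler).

-- ===== PORT A =====

-- any(x in line.lower() for x in ['integration', …])
def pvMetaA (line : String) : Bool :=
  let low := PySem.Str.lower line
  PySem.Str.isIn "integration" low || PySem.Str.isIn "summary" low ||
  PySem.Str.isIn "changes" low || PySem.Str.isIn "statistics" low ||
  PySem.Str.isIn "note" low || PySem.Str.isIn "important" low

-- any(x in line for x in ['# Integration Summary', …])  (case-sensitive)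
def pvBreakA (line : String) : Bool :=
  PySem.Str.isIn "# Integration Summary" line || PySem.Str.isIn "# Changes Made" line ||
  PySem.Str.isIn "# Final Statistics" line || PySem.Str.isIn "Would you like" line ||
  PySem.Str.isIn "Shall I proceed" line

-- any(phrase in line.lower() for phrase in ['would you like', …])
def pvCleanA (line : String) : Bool :=
  let low := PySem.Str.lower line
  PySem.Str.isIn "would you like" low || PySem.Str.isIn "shall i proceed" low ||
  PySem.Str.isIn "important note" low || PySem.Str.isIn "due to length limitations" low

-- the 'for line in lines' loop with its break, state = (paper_lines, found_title)
def pvLoopA : List String → List String → Bool → List String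
  | [], acc, _ => acc
  | line :: ls, acc, found =>
    if !found && PySem.Str.startswith line "# " && !pvMetaA line then
      pvLoopA ls (acc ++ [line]) true
    else if found then
      if pvBreakA line then acc else pvLoopA ls (acc ++ [line]) found
    else if !found && !(PySem.Str.strip line == "") && !PySem.Str.startswith line "#" then
      pvLoopA ls (acc ++ [line]) found
    else
      pvLoopA ls acc found

-- content.split('\n'): the separator is the nonempty literal "\n", so split? is always some
def extract_final_paper_py (content : String) : String :=
  let lines := (PySem.Str.split? content "\n").getD []
  let paper_lines := pvLoopA lines [] false
  let final_paper := PySem.Str.strip (PySem.Str.join "\n" paper_lines)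
  if PySem.Str.len final_paper < 1000 then
    let cleaned_lines := ((PySem.Str.split? content "\n").getD []).foldl
      (fun acc line => if !pvCleanA line then acc ++ [line] else acc) []
    PySem.Str.strip (PySem.Str.join "\n" cleaned_lines)
  else final_paper

-- ===== PORT B =====

def pvIsTitle (line : String) : Bool :=
  PySem.Str.startswith line "# " &&
    !(["integration", "summary", "changes", "statistics", "note", "important"].any
        (fun x => PySem.Str.isIn x (PySem.Str.lower line)))

def pvIsBreak (line : String) : Bool :=
  ["# Integration Summary", "# Changes Made", "# Final Statistics",
   "Would you like", "Shall I proceed"].any (fun x => PySem.Str.isIn x line)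

def pvKeep (line : String) : Bool :=
  !(PySem.Str.strip line == "") && !PySem.Str.startswith line "#"

def pvNoise (line : String) : Bool :=
  ["would you like", "shall i proceed", "important note", "due to length limitations"].any
    (fun p => PySem.Str.isIn p (PySem.Str.lower line))

-- content.split('\n') as in port A; idx = next((i for i,l in enumerate(lines) if is_title(l)), len(lines))
def extract_final_paper_py_alt (content : String) : String :=
  let lines := (PySem.Str.split? content "\n").getD []
  let idx : Nat := (lines.findIdx? pvIsTitle).getD lines.length
  let pre := (lines.take idx).filter pvKeep
  let paper_lines :=
    if idx < lines.length then
      pre ++ PySem.List.pyGetD lines (idx : Int) "" ::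
        ((lines.drop (idx + 1)).takeWhile (fun l => !pvIsBreak l))
    else pre
  let final_paper := PySem.Str.strip (PySem.Str.join "\n" paper_lines)
  if PySem.Str.len final_paper < 1000 then
    PySem.Str.strip (PySem.Str.join "\n" (lines.filter (fun l => !pvNoise l)))
  else final_paper

-- ===== PRECONDITION & SPEC =====
def Spec_extract_final_paper_py (content : String) (out : String) : Prop := out = extract_final_paper_py_alt content
instance (content : String) (out : String) : Decidable (Spec_extract_final_paper_py content out) := by unfold Spec_extract_final_paper_py; infer_instance

-- ===== CLAIM (what is proved, stated in full; the proofs are below) =====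
def Claim_equal_extract_final_paper_py : Prop := ∀ (content : String), Dom_extract_final_paper_py content → Spec_extract_final_paper_py content (extract_final_paper_py content)

-- ===== LEMMAS AND PROOFS =====

-- the two phases of A's loop, written as one structural function (proof-side helper)
def pvBB : List String → List String
  | [] => []
  | line :: ls =>
    if pvIsTitle line then line :: ls.takeWhile (fun l => !pvIsBreak l)
    else (if pvKeep line then [line] else []) ++ pvBB ls

theorem pvIsTitle_eq (l : String) :
    pvIsTitle l = (PySem.Str.startswith l "# " && !pvMetaA l) := by
  simp [pvIsTitle, pvMetaA, List.any_cons, List.any_nil, Bool.or_assoc]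

theorem pvIsBreak_eq : (fun l => !pvIsBreak l) = (fun l => !pvBreakA l) := by
  funext l
  simp [pvIsBreak, pvBreakA, List.any_cons, List.any_nil, Bool.or_assoc]

theorem pvNoise_eq : (fun l => !pvNoise l) = (fun l => !pvCleanA l) := by
  funext l
  simp [pvNoise, pvCleanA, List.any_cons, List.any_nil, Bool.or_assoc]

-- A's loop after the title is found: take lines until a break phrase
theorem pvLoopA_true (ls : List String) (acc : List String) :
    pvLoopA ls acc true = acc ++ ls.takeWhile (fun l => !pvBreakA l) := by
  induction ls generalizing acc with
  | nil => simp [pvLoopA]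
  | cons l ls ih =>
    simp only [pvLoopA, Bool.not_true, Bool.false_and, List.takeWhile_cons]
    by_cases h : pvBreakA l = true <;> simp [h, ih]

-- A's loop before the title is found computes pvBB
theorem pvLoopA_false (ls : List String) (acc : List String) :
    pvLoopA ls acc false = acc ++ pvBB ls := by
  induction ls generalizing acc with
  | nil => simp [pvLoopA, pvBB]
  | cons l ls ih =>
    have hc : (!false && PySem.Str.startswith l "# " && !pvMetaA l) = pvIsTitle l := by
      rw [pvIsTitle_eq]; simp
    have hk : (!false && !(PySem.Str.strip l == "") && !PySem.Str.startswith l "#") = pvKeep l := by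
      rw [pvKeep]; simp
    rw [pvLoopA, hc, hk]
    cases ht : pvIsTitle l with
    | true =>
      rw [pvLoopA_true, pvBB, ht, if_pos rfl, pvIsBreak_eq]
      simp
    | false =>
      rw [pvBB, ht]
      cases hkl : pvKeep l <;> simp [ih]

-- B's three-piece build computes pvBB
theorem pvAlt_build (ls : List String) :
    (if (ls.findIdx? pvIsTitle).getD ls.length < ls.length then
       (ls.take ((ls.findIdx? pvIsTitle).getD ls.length)).filter pvKeep ++
         PySem.List.pyGetD ls (((ls.findIdx? pvIsTitle).getD ls.length : Nat) : Int) "" ::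
           ((ls.drop ((ls.findIdx? pvIsTitle).getD ls.length + 1)).takeWhile (fun l => !pvIsBreak l))
     else (ls.take ((ls.findIdx? pvIsTitle).getD ls.length)).filter pvKeep) = pvBB ls := by
  induction ls with
  | nil => simp [pvBB]
  | cons l ls ih =>
    rw [List.findIdx?_cons]
    cases ht : pvIsTitle l with
    | true =>
      simp [ht, pvBB]
    | false =>
      simp only [ht, Bool.false_eq_true, if_false, pvBB]
      cases hf : ls.findIdx? pvIsTitle with
      | none =>
        have hih : ls.filter pvKeep = pvBB ls := by simpa [hf] using ih
        simp only [Option.map_none, Option.getD_none, List.length_cons, List.take_length,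
          List.take_succ_cons, List.filter_cons]
        rw [if_neg (by omega)]
        cases hkl : pvKeep l <;> simp [hih]
      | some i =>
        have hlt : i < ls.length := by
          have := List.findIdx?_eq_some_iff_findIdx_eq.mp hf; omega
        have hih : (ls.take i).filter pvKeep ++ ls.getD i "" ::
            ((ls.drop (i + 1)).takeWhile (fun l => !pvIsBreak l)) = pvBB ls := by
          simpa [hf, hlt, PySem.List.pyGetD_natCast] using ih
        simp only [Option.map_some, Option.getD_some, List.length_cons,
          List.take_succ_cons, List.filter_cons, List.drop_succ_cons,
          PySem.List.pyGetD_natCast]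
        rw [if_pos (by omega)]
        have hget : (l :: ls).getD (i + 1) "" = ls.getD i "" := by simp
        rw [hget]
        cases hkl : pvKeep l <;> simp [← hih]

-- ===== VERDICT (by name: the statement is the Claim_ definition above) =====
theorem extract_final_paper_py_spec : Claim_equal_extract_final_paper_py := by
  intro content _
  unfold Spec_extract_final_paper_py
  simp only [extract_final_paper_py, extract_final_paper_py_alt]
  rw [pvLoopA_false, List.nil_append, PySem.List.foldl_append_if_eq_filter, List.nil_append,
    pvAlt_build, pvNoise_eq]
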